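-- pv_equiv track=rewrite | github.com/dodongmin/CodingTestAlone-main | BaekJoon/12904.py | function
-- ===== SOURCE A (Python) =====
-- def function(s, t):
--     while len(s) != len(t):
--         if t[-1] == 'A':
--             t.pop()
--         else:
--             t.pop()
--             t = t[::-1]
--
--     if s == t:
--         return 1
--     else:
--         return 0
-- ===== SOURCE B (Python) =====
-- def function(s, t):
--     # Window t[lo:hi] with a direction flag instead of repeated list reversal.
--     # (Return-value equivalence only: A mutates t via pop(); B does not.)
--     lo, hi = 0, len(t)
--     rev = False
--     n = len(s)
--     while hi - lo > n:
--         if rev: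
--             c = t[lo]
--             lo += 1
--         else:
--             c = t[hi - 1]
--             hi -= 1
--         if c != 'A':
--             rev = not rev
--     rest = t[lo:hi]
--     if rev:
--         rest.reverse()
--     return 1 if rest == s else 0
-- ===== Notes on version B (the rewrite author's own statement) =====
-- stated objective: alternative
-- what changed: B replaces A's pop-and-reverse loop by a two-index window over t with a direction flag, popping from whichever end is currently 'last', so no list is ever reversed or copied inside the loop.
-- crash fix: When len(s) > len(t), A pops t empty and raises IndexError on t[-1]; B's loop never starts there and it returns 0 (lengths differ, so the lists cannot be equal). — e.g. on function(["A"], []): A raises IndexError, B returns 0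
import Mathlib
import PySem

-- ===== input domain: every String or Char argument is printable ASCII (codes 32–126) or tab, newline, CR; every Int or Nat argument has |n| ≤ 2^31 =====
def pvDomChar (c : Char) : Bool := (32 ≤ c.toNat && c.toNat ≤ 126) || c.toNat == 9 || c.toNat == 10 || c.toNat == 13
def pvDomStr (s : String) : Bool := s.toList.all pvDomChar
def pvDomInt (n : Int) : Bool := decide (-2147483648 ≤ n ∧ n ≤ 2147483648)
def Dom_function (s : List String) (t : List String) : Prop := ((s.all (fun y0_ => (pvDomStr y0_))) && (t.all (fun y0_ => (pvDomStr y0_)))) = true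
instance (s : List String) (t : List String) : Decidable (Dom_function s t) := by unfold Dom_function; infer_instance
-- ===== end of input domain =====

-- B replaces A's pop-and-reverse loop by a two-index window with a direction flag;
-- return-value equivalence only: Python A mutates t via pop(), B does not.

-- ===== PORT A =====
-- the while loop: pop from the end; on a non-'A' pop, reverse the remainder
def loopA (s t : List String) : List String :=
  if s.length = t.length then t
  else
    match h : t.getLast? with
    | none => []   -- Python raises IndexError on t[-1] here (t empty); excluded by Pre_function
    | some last =>
      if last = "A" then loopA s t.dropLast
      else loopA s t.dropLast.reverse
termination_by t.length
decreasing_by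
  all_goals
    have ht : t ≠ [] := by intro he; subst he; simp at h
    simp [List.length_dropLast]
    cases t with
    | nil => exact absurd rfl ht
    | cons a l => simp

def function (s : List String) (t : List String) : Int :=
  if loopA s t = s then 1 else 0

-- ===== PORT B =====
-- the while loop of Source B: shrink the window t[lo:hi] from the current "last" end
def loopB (t : List String) (n lo hi : Nat) (rev : Bool) : Nat × Nat × Bool :=
  if hi - lo > n then
    if rev then
      let c := t.getD lo ""        -- t[lo]; always in range when the loop runs inside Pre_
      loopB t n (lo + 1) hi (if c ≠ "A" then !rev else rev)
    else
      let c := t.getD (hi - 1) ""  -- t[hi-1]; always in range when the loop runs inside Pre_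
      loopB t n lo (hi - 1) (if c ≠ "A" then !rev else rev)
  else (lo, hi, rev)
termination_by hi - lo
decreasing_by all_goals omega

def function_alt (s : List String) (t : List String) : Int :=
  let r := loopB t s.length 0 t.length false
  let rest := (t.drop r.1).take (r.2.1 - r.1)   -- t[lo:hi] with 0 ≤ lo ≤ hi ≤ len t
  if (if r.2.2 then rest.reverse else rest) = s then 1 else 0

-- ===== PRECONDITION & SPEC =====
-- Pre_ excludes exactly the inputs where A raises: if len(s) > len(t) the loop pops t
-- empty and t[-1] raises IndexError.
def Pre_function (s : List String) (t : List String) : Prop := s.length ≤ t.length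
instance (s : List String) (t : List String) : Decidable (Pre_function s t) := by unfold Pre_function; infer_instance
def pvWitness_function : List String × List String := (["A"], ["A", "B"])

-- When len(s) > len(t), A pops t empty and raises IndexError on t[-1]; B's loop never
-- starts there and it returns 0 (the lengths differ, so the lists cannot be equal).
def Raises_function (s : List String) (t : List String) : Prop := t.length < s.length
instance (s : List String) (t : List String) : Decidable (Raises_function s t) := by unfold Raises_function; infer_instance
def pvRaiseWitness_function : List String × List String := (["A"], [])
def pvRaiseWitnessOut_function : Int := 0

def Spec_function (s : List String) (t : List String) (out : Int) : Prop := out = function_alt s t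
instance (s : List String) (t : List String) (out : Int) : Decidable (Spec_function s t out) := by unfold Spec_function; infer_instance

-- ===== CLAIM (what is proved, stated in full; the proofs are below) =====
def Claim_equal_function : Prop := ∀ (s : List String) (t : List String), Dom_function s t → Pre_function s t → Spec_function s t (function s t)
def Claim_raises_function : Prop := (∀ (s : List String) (t : List String), Dom_function s t → Raises_function s t → ¬ Pre_function s t) ∧ (Dom_function (pvRaiseWitness_function.1) (pvRaiseWitness_function.2) ∧ Raises_function (pvRaiseWitness_function.1) (pvRaiseWitness_function.2) ∧ function_alt (pvRaiseWitness_function.1) (pvRaiseWitness_function.2) = pvRaiseWitnessOut_function)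

-- ===== LEMMAS AND PROOFS =====

-- t[lo:hi] as a list
def win (t : List String) (lo hi : Nat) : List String := (t.drop lo).take (hi - lo)

-- the list A's loop state corresponds to for B's state (lo, hi, rev)
def wrep (t : List String) (lo hi : Nat) (rev : Bool) : List String :=
  if rev then (win t lo hi).reverse else win t lo hi

lemma win_length (t : List String) (lo hi : Nat) (h : hi ≤ t.length) :
    (win t lo hi).length = hi - lo := by
  simp [win]; omega

lemma win_cons (t : List String) (lo hi : Nat) (h1 : lo < hi) (h2 : hi ≤ t.length) :
    win t lo hi = t.getD lo "" :: win t (lo + 1) hi := by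
  have hlo : lo < t.length := by omega
  unfold win
  rw [List.drop_eq_getElem_cons hlo]
  have hh : hi - lo = (hi - (lo + 1)) + 1 := by omega
  rw [hh, List.take_succ_cons, List.getD_eq_getElem t "" hlo]

lemma win_snoc (t : List String) (lo hi : Nat) (h1 : lo < hi) (h2 : hi ≤ t.length) :
    win t lo hi = win t lo (hi - 1) ++ [t.getD (hi - 1) ""] := by
  have hhi : hi - 1 < t.length := by omega
  unfold win
  have hh : hi - lo = (hi - 1 - lo) + 1 := by omega
  rw [hh, List.take_add_one]
  congr 1
  have hidx : (t.drop lo)[hi - 1 - lo]? = t[hi - 1]? := by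
    rw [List.getElem?_drop]
    have he : lo + (hi - 1 - lo) = hi - 1 := by omega
    rw [he]
  rw [hidx, List.getElem?_eq_getElem hhi, List.getD_eq_getElem t "" hhi]
  simp

lemma wrep_false (t : List String) (lo hi : Nat) : wrep t lo hi false = win t lo hi := by
  simp [wrep]

lemma wrep_true (t : List String) (lo hi : Nat) : wrep t lo hi true = (win t lo hi).reverse := by
  simp [wrep]

lemma loop_eq (s t : List String) :
    ∀ (n lo hi : Nat) (rev : Bool), hi - lo = n → lo ≤ hi → hi ≤ t.length → s.length ≤ hi - lo →
    loopA s (wrep t lo hi rev) =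
      wrep t (loopB t s.length lo hi rev).1 (loopB t s.length lo hi rev).2.1
        (loopB t s.length lo hi rev).2.2 := by
  intro n
  induction n with
  | zero =>
    intro lo hi rev hn _ hhi hs
    have hstop : ¬ (hi - lo > s.length) := by omega
    rw [loopB, if_neg hstop, loopA]
    have hlen : s.length = (wrep t lo hi rev).length := by
      unfold wrep; split <;> simp [win_length t lo hi hhi] <;> omega
    rw [if_pos hlen]
  | succ m ih =>
    intro lo hi rev hn hlohi hhi hs
    by_cases hstop : hi - lo > s.length
    · -- both loops take one step
      have hlt : lo < hi := by omega
      have hlen : ¬ (s.length = (wrep t lo hi rev).length) := by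
        unfold wrep; split <;> simp [win_length t lo hi hhi] <;> omega
      rw [loopB, if_pos hstop, loopA, if_neg hlen]
      cases rev with
      | false =>
        rw [if_neg (by simp : ¬ (false = true))]
        have hw : wrep t lo hi false = win t lo (hi - 1) ++ [t.getD (hi - 1) ""] := by
          unfold wrep; simp [win_snoc t lo hi hlt hhi]
        rw [hw, List.getLast?_concat]
        simp only [List.dropLast_concat]
        by_cases hc : t.getD (hi - 1) "" = "A"
        · rw [if_pos hc]
          have hflag : (if t.getD (hi - 1) "" ≠ "A" then !false else false) = false := by
            rw [if_neg (not_not_intro hc)]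
          rw [hflag]
          have := ih lo (hi - 1) false (by omega) (by omega) (by omega) (by omega)
          rwa [wrep_false] at this
        · rw [if_neg hc]
          have hflag : (if t.getD (hi - 1) "" ≠ "A" then !false else false) = true := by
            rw [if_pos hc]; rfl
          rw [hflag]
          have := ih lo (hi - 1) true (by omega) (by omega) (by omega) (by omega)
          rwa [wrep_true] at this
      | true =>
        rw [if_pos (rfl : (true : Bool) = true)]
        have hw : wrep t lo hi true = (win t (lo + 1) hi).reverse ++ [t.getD lo ""] := by
          unfold wrep
          simp [win_cons t lo hi hlt hhi]
        rw [hw, List.getLast?_concat]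
        simp only [List.dropLast_concat]
        by_cases hc : t.getD lo "" = "A"
        · rw [if_pos hc]
          have hflag : (if t.getD lo "" ≠ "A" then !true else true) = true := by
            rw [if_neg (not_not_intro hc)]
          rw [hflag]
          have := ih (lo + 1) hi true (by omega) (by omega) (by omega) (by omega)
          rwa [wrep_true] at this
        · rw [if_neg hc]
          have hflag : (if t.getD lo "" ≠ "A" then !true else true) = false := by
            rw [if_pos hc]; rfl
          rw [hflag, List.reverse_reverse]
          have := ih (lo + 1) hi false (by omega) (by omega) (by omega) (by omega)
          rwa [wrep_false] at this
    · rw [loopB, if_neg hstop, loopA]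
      have hlen : s.length = (wrep t lo hi rev).length := by
        unfold wrep; split <;> simp [win_length t lo hi hhi] <;> omega
      rw [if_pos hlen]

-- ===== VERDICT (by name: the statement is the Claim_ definition above) =====
theorem function_spec : Claim_equal_function := by
  intro s t _ hpre
  unfold Spec_function function function_alt
  have h0 : wrep t 0 t.length false = t := by simp [wrep, win]
  have := loop_eq s t (t.length - 0) 0 t.length false rfl (by omega) le_rfl (by simpa using hpre)
  rw [h0] at this
  rw [this]
  unfold wrep win
  rfl

@[simp]
theorem function_raises : Claim_raises_function := by
  unfold Claim_raises_function
  constructor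
  · intro s t _ hr
    unfold Raises_function at hr
    unfold Pre_function
    omega
  · refine ⟨by decide, by decide, ?_⟩
    show function_alt ["A"] [] = 0
    unfold function_alt
    rw [loopB]
    simp
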